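-- pv_equiv track=rewrite | github.com/hugots363/adventOfCode2023 | day11_py/cosmicExpansion.py | duplicate_columns
-- ===== SOURCE A (Python) =====
-- def duplicate_columns(matrix, columns_to_duplicate):
--     if not matrix or not matrix[0]:
--         return matrix
--
--     duplicated_matrix = []
--
--     for row in matrix:
--         duplicated_row = []
--         for col_idx, value in enumerate(row):
--             if col_idx in columns_to_duplicate:
--                 duplicated_row.append(value)
--             duplicated_row.append(value)
--
--         duplicated_matrix.append(duplicated_row)
--
--     return duplicated_matrix
-- ===== SOURCE B (Python) =====
-- def duplicate_columns(matrix, columns_to_duplicate):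
--     # B: build a duplicated index table per row width once, then gather each
--     # row through it, instead of testing membership and appending per cell.
--     if not matrix or not matrix[0]:
--         return matrix
--
--     def index_table(n):
--         idxs = []
--         for i in range(n):
--             idxs.append(i)
--             if i in columns_to_duplicate:
--                 idxs.append(i)
--         return idxs
--
--     return [[row[i] for i in index_table(len(row))] for row in matrix]
-- ===== Notes on version B (the rewrite author's own statement) =====
-- stated objective: alternative
-- what changed: B precomputes an expanded index table per row width and gathers each row through it in one pass, instead of A's per-cell membership test with conditional appends into an accumulator.
import Mathlib
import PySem

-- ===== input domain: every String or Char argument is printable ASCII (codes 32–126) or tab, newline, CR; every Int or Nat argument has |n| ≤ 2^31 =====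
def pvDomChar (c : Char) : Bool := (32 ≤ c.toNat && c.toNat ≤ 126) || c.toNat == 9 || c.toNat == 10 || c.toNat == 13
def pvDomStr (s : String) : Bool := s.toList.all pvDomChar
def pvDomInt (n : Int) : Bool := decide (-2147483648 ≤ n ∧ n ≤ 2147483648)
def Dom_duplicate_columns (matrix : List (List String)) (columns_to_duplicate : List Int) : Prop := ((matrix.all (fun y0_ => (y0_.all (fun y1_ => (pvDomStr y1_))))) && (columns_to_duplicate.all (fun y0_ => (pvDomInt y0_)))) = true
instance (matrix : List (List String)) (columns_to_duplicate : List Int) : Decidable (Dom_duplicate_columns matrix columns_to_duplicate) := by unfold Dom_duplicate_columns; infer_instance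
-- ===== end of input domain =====

-- B builds an expanded index table per row width and gathers the row through it
-- (alternative decomposition, same cost); A tests membership per cell.

-- ===== PORT A =====
def duplicate_columns (matrix : List (List String)) (columns_to_duplicate : List Int) : List (List String) :=
  if matrix = [] ∨ matrix.headD [] = [] then matrix
  else
    matrix.foldl (fun duplicated_matrix row =>
      duplicated_matrix ++
        [(PySem.List.enumerate row 0).foldl (fun duplicated_row p =>
            (if p.1 ∈ columns_to_duplicate then duplicated_row ++ [p.2] else duplicated_row)
              ++ [p.2]) []]) []

-- ===== PORT B =====
-- index_table(n) of Source B
def pvIndexTable (columns_to_duplicate : List Int) (n : Int) : List Int :=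
  (PySem.List.pyRange 0 n 1).foldl (fun idxs i =>
    let idxs := idxs ++ [i]
    if i ∈ columns_to_duplicate then idxs ++ [i] else idxs) []

def duplicate_columns_alt (matrix : List (List String)) (columns_to_duplicate : List Int) : List (List String) :=
  if matrix = [] ∨ matrix.headD [] = [] then matrix
  else
    matrix.map (fun row =>
      (pvIndexTable columns_to_duplicate (row.length : Int)).map
        (fun i => PySem.List.pyGetD row i ""))

-- ===== PRECONDITION & SPEC =====
def Spec_duplicate_columns (matrix : List (List String)) (columns_to_duplicate : List Int) (out : List (List String)) : Prop := out = duplicate_columns_alt matrix columns_to_duplicate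
instance (matrix : List (List String)) (columns_to_duplicate : List Int) (out : List (List String)) : Decidable (Spec_duplicate_columns matrix columns_to_duplicate out) := by unfold Spec_duplicate_columns; infer_instance

-- ===== CLAIM (what is proved, stated in full; the proofs are below) =====
def Claim_equal_duplicate_columns : Prop := ∀ (matrix : List (List String)) (columns_to_duplicate : List Int), Dom_duplicate_columns matrix columns_to_duplicate → Spec_duplicate_columns matrix columns_to_duplicate (duplicate_columns matrix columns_to_duplicate)

-- ===== LEMMAS AND PROOFS =====

theorem aRow_eq_flatMap (cols : List Int) (row : List String) :
    (PySem.List.enumerate row 0).foldl (fun duplicated_row p =>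
      (if p.1 ∈ cols then duplicated_row ++ [p.2] else duplicated_row) ++ [p.2]) []
    = (PySem.List.enumerate row 0).flatMap
        (fun p => (if p.1 ∈ cols then [p.2] else []) ++ [p.2]) := by
  have h : (fun (duplicated_row : List String) (p : Int × String) =>
      (if p.1 ∈ cols then duplicated_row ++ [p.2] else duplicated_row) ++ [p.2])
      = (fun duplicated_row p =>
          duplicated_row ++ ((if p.1 ∈ cols then [p.2] else []) ++ [p.2])) := by
    funext dr p
    by_cases hc : p.1 ∈ cols <;> simp [hc]
  rw [h, PySem.List.foldl_append_eq_flatMap]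
  simp

theorem idxTable_eq_flatMap (cols : List Int) (n : Int) :
    pvIndexTable cols n
    = (PySem.List.pyRange 0 n 1).flatMap
        (fun i => [i] ++ (if i ∈ cols then [i] else [])) := by
  unfold pvIndexTable
  have h : (fun (idxs : List Int) (i : Int) =>
      let idxs := idxs ++ [i]
      if i ∈ cols then idxs ++ [i] else idxs)
      = (fun idxs i => idxs ++ ([i] ++ (if i ∈ cols then [i] else []))) := by
    funext idxs i
    by_cases hc : i ∈ cols <;> simp [hc]
  rw [h, PySem.List.foldl_append_eq_flatMap]
  simp

theorem row_eq (cols : List Int) (row : List String) :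
    (PySem.List.enumerate row 0).foldl (fun duplicated_row p =>
      (if p.1 ∈ cols then duplicated_row ++ [p.2] else duplicated_row) ++ [p.2]) []
    = (pvIndexTable cols (row.length : Int)).map (fun i => PySem.List.pyGetD row i "") := by
  rw [aRow_eq_flatMap, idxTable_eq_flatMap,
      PySem.List.enumerate_eq_map_pyRange (d := "")]
  rw [List.flatMap_map, List.map_flatMap]
  apply List.flatMap_congr
  intro i _
  by_cases hc : i ∈ cols <;> simp [hc]

-- ===== VERDICT (by name: the statement is the Claim_ definition above) =====
theorem duplicate_columns_spec : Claim_equal_duplicate_columns := by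
  intro matrix cols _
  unfold Spec_duplicate_columns duplicate_columns duplicate_columns_alt
  split
  · rfl
  · rw [PySem.List.foldl_append_singleton_eq_map]
    simp only [List.nil_append]
    exact List.map_congr_left (fun row _ => row_eq cols row)
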